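-- pv_equiv track=rewrite | github.com/S-A-I-V/CodeForcesProblem | busseating.py | get_off_order
-- ===== SOURCE A (Python) =====
-- def get_off_order(n, m):
--     left_window = []
--     right_window = []
--     left_non_window = []
--     right_non_window = []
--
--     for i in range(1, n + 1):
--         if len(left_window) + len(right_window) < m:
--             left_window.append(len(left_window) + len(right_window) + 1)
--         if len(left_window) + len(right_window) < m:
--             right_window.append(len(left_window) + len(right_window) + 1)
--
--     for i in range(1, n + 1):
--         if len(left_window) + len(right_window) + len(left_non_window) + len(right_non_window) < m:
--             left_non_window.append(len(left_window) + len(right_window) + len(left_non_window) + len(right_non_window) + 1)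
--         if len(left_window) + len(right_window) + len(left_non_window) + len(right_non_window) < m:
--             right_non_window.append(len(left_window) + len(right_window) + len(left_non_window) + len(right_non_window) + 1)
--
--     off_order = []
--     for i in range(n):
--         if i < len(left_non_window):
--             off_order.append(left_non_window[i])
--         if i < len(left_window):
--             off_order.append(left_window[i])
--         if i < len(right_non_window):
--             off_order.append(right_non_window[i])
--         if i < len(right_window):
--             off_order.append(right_window[i])
--
--     return off_order
-- ===== SOURCE B (Python) =====
-- def get_off_order(n, m):
--     if n <= 0:
--         return []
--     w = max(0, min(2 * n, m))        # seats handed out in the window pass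
--     v = max(0, min(2 * n, m - w))    # seats handed out in the non-window pass
--     lw, rw = (w + 1) // 2, w // 2
--     lv, rv = (v + 1) // 2, v // 2
--     out = []
--     for i in range(max(lw, lv)):
--         if i < lv:
--             out.append(w + 2 * i + 1)
--         if i < lw:
--             out.append(2 * i + 1)
--         if i < rv:
--             out.append(w + 2 * i + 2)
--         if i < rw:
--             out.append(2 * i + 2)
--     return out
-- ===== Notes on version B (the rewrite author's own statement) =====
-- stated objective: faster
-- what changed: B replaces A's three O(n) list-building loops (window pass, non-window pass, interleaving pass over range(n)) by closed-form seat counts and direct index formulas, emitting the off-boarding order in one loop of length max(ceil(w/2),ceil(v/2)) = O(min(n,m)).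
import Mathlib
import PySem

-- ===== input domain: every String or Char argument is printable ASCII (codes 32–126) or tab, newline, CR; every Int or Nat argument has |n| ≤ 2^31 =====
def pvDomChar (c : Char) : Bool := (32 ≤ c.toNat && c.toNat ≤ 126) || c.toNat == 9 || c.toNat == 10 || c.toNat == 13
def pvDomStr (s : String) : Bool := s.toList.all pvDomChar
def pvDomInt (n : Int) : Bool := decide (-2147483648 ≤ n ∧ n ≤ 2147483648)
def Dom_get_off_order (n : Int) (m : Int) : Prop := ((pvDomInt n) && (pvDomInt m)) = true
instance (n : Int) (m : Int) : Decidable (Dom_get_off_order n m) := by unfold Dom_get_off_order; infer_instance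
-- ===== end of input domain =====

-- B replaces A's three O(n) accumulation loops by a closed-form interleaving of size O(min(n,m)); objective: faster.

-- ===== PORT A =====
def get_off_order (n : Int) (m : Int) : List Int :=
  let s1 := (PySem.List.pyRange 1 (n+1) 1).foldl (fun (st : List Int × List Int) _ =>
      let lw := if ((st.1.length : Int) + st.2.length < m)
                then st.1 ++ [((st.1.length : Int) + st.2.length + 1)] else st.1
      let rw := if ((lw.length : Int) + st.2.length < m)
                then st.2 ++ [((lw.length : Int) + st.2.length + 1)] else st.2
      (lw, rw)) ([], [])
  let lw := s1.1
  let rw := s1.2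
  let s2 := (PySem.List.pyRange 1 (n+1) 1).foldl (fun (st : List Int × List Int) _ =>
      let ln := if ((lw.length : Int) + rw.length + st.1.length + st.2.length < m)
                then st.1 ++ [((lw.length : Int) + rw.length + st.1.length + st.2.length + 1)] else st.1
      let rn := if ((lw.length : Int) + rw.length + ln.length + st.2.length < m)
                then st.2 ++ [((lw.length : Int) + rw.length + ln.length + st.2.length + 1)] else st.2
      (ln, rn)) ([], [])
  let ln := s2.1
  let rn := s2.2
  (PySem.List.pyRange 0 n 1).foldl (fun acc i =>
    let acc := if i < (ln.length : Int) then acc ++ [PySem.List.pyGetD ln i 0] else acc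
    let acc := if i < (lw.length : Int) then acc ++ [PySem.List.pyGetD lw i 0] else acc
    let acc := if i < (rn.length : Int) then acc ++ [PySem.List.pyGetD rn i 0] else acc
    if i < (rw.length : Int) then acc ++ [PySem.List.pyGetD rw i 0] else acc) []

-- ===== PORT B =====
def get_off_order_alt (n : Int) (m : Int) : List Int :=
  if n ≤ 0 then []
  else
    let w := max 0 (min (2*n) m)
    let v := max 0 (min (2*n) (m - w))
    let lw := PySem.Int.floordiv (w+1) 2
    let rw := PySem.Int.floordiv w 2
    let lv := PySem.Int.floordiv (v+1) 2
    let rv := PySem.Int.floordiv v 2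
    (PySem.List.pyRange 0 (max lw lv) 1).foldl (fun acc i =>
      let acc := if i < lv then acc ++ [w + 2*i + 1] else acc
      let acc := if i < lw then acc ++ [2*i + 1] else acc
      let acc := if i < rv then acc ++ [w + 2*i + 2] else acc
      if i < rw then acc ++ [2*i + 2] else acc) []

-- ===== PRECONDITION & SPEC =====
def Spec_get_off_order (n : Int) (m : Int) (out : List Int) : Prop := out = get_off_order_alt n m
instance (n : Int) (m : Int) (out : List Int) : Decidable (Spec_get_off_order n m out) := by unfold Spec_get_off_order; infer_instance

-- ===== CLAIM (what is proved, stated in full; the proofs are below) =====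
def Claim_equal_get_off_order : Prop := ∀ (n : Int) (m : Int), Dom_get_off_order n m → Spec_get_off_order n m (get_off_order n m)

-- ===== LEMMAS AND PROOFS =====

-- lists produced by A's accumulation loops, in closed form
def pvOdds (c k : Nat) : List Int := (List.range k).map (fun j : Nat => (c : Int) + 2*(j : Int) + 1)
def pvEvens (c k : Nat) : List Int := (List.range k).map (fun j : Nat => (c : Int) + 2*(j : Int) + 2)

-- one iteration of A's loop 1 / loop 2 (offset c = number of seats already handed out before the loop)
def pvStep (m : Int) (c : Nat) (st : List Int × List Int) : List Int × List Int :=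
  let L := if ((c : Int) + st.1.length + st.2.length < m)
           then st.1 ++ [((c : Int) + st.1.length + st.2.length + 1)] else st.1
  let R := if ((c : Int) + L.length + st.2.length < m)
           then st.2 ++ [((c : Int) + L.length + st.2.length + 1)] else st.2
  (L, R)

@[simp] lemma pvOdds_length (c k : Nat) : (pvOdds c k).length = k := by simp [pvOdds]
@[simp] lemma pvEvens_length (c k : Nat) : (pvEvens c k).length = k := by simp [pvEvens]

lemma pvOdds_succ (c k : Nat) : pvOdds c (k+1) = pvOdds c k ++ [(c : Int) + 2*k + 1] := by
  simp [pvOdds, List.range_succ]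

lemma pvEvens_succ (c k : Nat) : pvEvens c (k+1) = pvEvens c k ++ [(c : Int) + 2*k + 2] := by
  simp [pvEvens, List.range_succ]

lemma foldl_ignore {α β : Type} (f : β → β) (l : List α) (init : β) :
    l.foldl (fun st _ => f st) init = f^[l.length] init := by
  induction l generalizing init with
  | nil => rfl
  | cons x t ih => simp [List.foldl_cons, ih, Function.iterate_succ_apply]

lemma pvStep_iterate (m : Int) (c k : Nat) :
    (pvStep m c)^[k] (([], []) : List Int × List Int) =
      (pvOdds c ((min (2*k) (m.toNat - c) + 1)/2), pvEvens c ((min (2*k) (m.toNat - c))/2)) := by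
  induction k with
  | zero => simp [pvOdds, pvEvens]
  | succ k ih =>
    rw [Function.iterate_succ_apply', ih]
    set M := m.toNat with hM
    set t := min (2*k) (M - c) with ht
    set t' := min (2*(k+1)) (M - c) with ht'
    simp only [pvStep, pvOdds_length, pvEvens_length, Prod.mk.injEq]
    split_ifs with hA hB hB
    · -- both appends fire
      have hA' : c + t < M := by omega
      simp only [List.length_append, List.length_singleton, pvOdds_length] at hB ⊢
      have hB' : c + t + 1 < M := by omega
      have e1 : (t' + 1)/2 = (t + 1)/2 + 1 := by omega
      have e2 : t'/2 = t/2 + 1 := by omega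
      rw [e1, e2, pvOdds_succ, pvEvens_succ]
      constructor
      · have hv : ((c : Int) + ((t+1)/2 : Nat) + ((t/2 : Nat) : Int) + 1)
            = (c : Int) + 2*(((t+1)/2 : Nat) : Int) + 1 := by omega
        rw [hv]
      · have hv : ((c : Int) + (((t+1)/2 + 1 : Nat) : Int) + ((t/2 : Nat) : Int) + 1)
            = (c : Int) + 2*((t/2 : Nat) : Int) + 2 := by push_cast; omega
        rw [hv]
    · -- only the left append fires
      have hA' : c + t < M := by omega
      simp only [List.length_append, List.length_singleton, pvOdds_length] at hB ⊢
      have hB' : ¬ (c + t + 1 < M) := by omega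
      have e1 : (t' + 1)/2 = (t + 1)/2 + 1 := by omega
      have e2 : t'/2 = t/2 := by omega
      rw [e1, e2, pvOdds_succ]
      refine ⟨?_, rfl⟩
      have hv : ((c : Int) + ((t+1)/2 : Nat) + ((t/2 : Nat) : Int) + 1)
          = (c : Int) + 2*(((t+1)/2 : Nat) : Int) + 1 := by omega
      rw [hv]
    · -- first condition false: the second is the same count, contradiction
      simp only [pvOdds_length] at hB
      exact absurd hB (by omega)
    · -- nothing fires
      have hA' : ¬ (c + t < M) := by omega
      have e0 : t' = t := by omega
      rw [e0]
      exact ⟨rfl, rfl⟩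

-- one off-boarding row, in closed form
def pvRow (w a b av bv : Nat) (j : Nat) : List Int :=
  (if j < av then [(w : Int) + 2*j + 1] else []) ++
  (if j < a then [(2*(j : Int) + 1)] else []) ++
  (if j < bv then [(w : Int) + 2*j + 2] else []) ++
  (if j < b then [(2*(j : Int) + 2)] else [])

lemma flatMap_range_shrink {f : Nat → List Int} (K N : Nat) (hKN : K ≤ N)
    (h : ∀ j, K ≤ j → f j = []) :
    (List.range N).flatMap f = (List.range K).flatMap f := by
  have : N = K + (N - K) := by omega
  rw [this, List.range_add, List.flatMap_append]
  have : (List.map (fun x => K + x) (List.range (N - K))).flatMap f = [] := by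
    simp only [List.flatMap_eq_nil_iff]
    intro x hx
    simp only [List.mem_map] at hx
    obtain ⟨j, _, rfl⟩ := hx
    exact h _ (by omega)
  rw [this, List.append_nil]

lemma loop1_eq (n m : Int) :
    ((PySem.List.pyRange 1 (n+1) 1).foldl (fun (st : List Int × List Int) _ =>
      let lw := if ((st.1.length : Int) + st.2.length < m)
                then st.1 ++ [((st.1.length : Int) + st.2.length + 1)] else st.1
      let rw := if ((lw.length : Int) + st.2.length < m)
                then st.2 ++ [((lw.length : Int) + st.2.length + 1)] else st.2
      (lw, rw)) ([], []))
    = (pvOdds 0 ((min (2*n.toNat) m.toNat + 1)/2), pvEvens 0 ((min (2*n.toNat) m.toNat)/2)) := by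
  have hb : (fun (st : List Int × List Int) (_ : Int) =>
      let lw := if ((st.1.length : Int) + st.2.length < m)
                then st.1 ++ [((st.1.length : Int) + st.2.length + 1)] else st.1
      let rw := if ((lw.length : Int) + st.2.length < m)
                then st.2 ++ [((lw.length : Int) + st.2.length + 1)] else st.2
      ((lw, rw) : List Int × List Int)) = (fun st _ => pvStep m 0 st) := by
    funext st i
    simp [pvStep]
  rw [hb, foldl_ignore, PySem.List.length_pyRange_one]
  have h1 : (n + 1 - 1).toNat = n.toNat := by omega
  rw [h1]
  have := pvStep_iterate m 0 n.toNat
  simpa using this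

lemma loop2_eq (n m : Int) (c : Nat) :
    ((PySem.List.pyRange 1 (n+1) 1).foldl (fun (st : List Int × List Int) _ =>
      let ln := if (((pvOdds 0 ((c+1)/2)).length : Int) + (pvEvens 0 (c/2)).length + st.1.length + st.2.length < m)
                then st.1 ++ [(((pvOdds 0 ((c+1)/2)).length : Int) + (pvEvens 0 (c/2)).length + st.1.length + st.2.length + 1)] else st.1
      let rn := if (((pvOdds 0 ((c+1)/2)).length : Int) + (pvEvens 0 (c/2)).length + ln.length + st.2.length < m)
                then st.2 ++ [(((pvOdds 0 ((c+1)/2)).length : Int) + (pvEvens 0 (c/2)).length + ln.length + st.2.length + 1)] else st.2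
      (ln, rn)) ([], []))
    = (pvOdds c ((min (2*n.toNat) (m.toNat - c) + 1)/2), pvEvens c ((min (2*n.toNat) (m.toNat - c))/2)) := by
  have hc : ((((c+1)/2 : Nat)) : Int) + ((c/2 : Nat) : Int) = (c : Int) := by omega
  have hb : (fun (st : List Int × List Int) (_ : Int) =>
      let ln := if (((pvOdds 0 ((c+1)/2)).length : Int) + (pvEvens 0 (c/2)).length + st.1.length + st.2.length < m)
                then st.1 ++ [(((pvOdds 0 ((c+1)/2)).length : Int) + (pvEvens 0 (c/2)).length + st.1.length + st.2.length + 1)] else st.1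
      let rn := if (((pvOdds 0 ((c+1)/2)).length : Int) + (pvEvens 0 (c/2)).length + ln.length + st.2.length < m)
                then st.2 ++ [(((pvOdds 0 ((c+1)/2)).length : Int) + (pvEvens 0 (c/2)).length + ln.length + st.2.length + 1)] else st.2
      ((ln, rn) : List Int × List Int)) = (fun st _ => pvStep m c st) := by
    funext st i
    simp only [pvStep, pvOdds_length, pvEvens_length]
    rw [hc]
  rw [hb, foldl_ignore, PySem.List.length_pyRange_one]
  have h1 : (n + 1 - 1).toNat = n.toNat := by omega
  rw [h1, pvStep_iterate m c n.toNat]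

lemma pvRow_nil (w a b av bv : Nat) (hba : b ≤ a) (hbav : bv ≤ av) (j : Nat)
    (hj : max a av ≤ j) : pvRow w a b av bv j = [] := by
  unfold pvRow
  rw [if_neg (by omega), if_neg (by omega), if_neg (by omega), if_neg (by omega)]
  rfl

lemma rowA_eq (t1 a b av bv : Nat) (j : Nat) :
    ((if ((j : Nat) : Int) < ((av : Nat) : Int) then [PySem.List.pyGetD (pvOdds t1 av) (j : Int) 0] else []) ++
     ((if ((j : Nat) : Int) < ((a : Nat) : Int) then [PySem.List.pyGetD (pvOdds 0 a) (j : Int) 0] else []) ++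
      ((if ((j : Nat) : Int) < ((bv : Nat) : Int) then [PySem.List.pyGetD (pvEvens t1 bv) (j : Int) 0] else []) ++
       (if ((j : Nat) : Int) < ((b : Nat) : Int) then [PySem.List.pyGetD (pvEvens 0 b) (j : Int) 0] else []))))
    = pvRow t1 a b av bv j := by
  unfold pvRow
  simp only [Nat.cast_lt, PySem.List.pyGetD_natCast]
  by_cases h1 : j < av <;> by_cases h2 : j < a <;> by_cases h3 : j < bv <;> by_cases h4 : j < b <;>
    simp [h1, h2, h3, h4, pvOdds, pvEvens]

lemma portA_eq (n m : Int) (t1 t2 : Nat) (h1 : t1 = min (2*n.toNat) m.toNat)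
    (h2 : t2 = min (2*n.toNat) (m.toNat - t1)) (hn : 0 < n) :
    get_off_order n m
      = (List.range (max ((t1+1)/2) ((t2+1)/2))).flatMap (pvRow t1 ((t1+1)/2) (t1/2) ((t2+1)/2) (t2/2)) := by
  unfold get_off_order
  rw [loop1_eq n m, ← h1]
  dsimp only
  rw [loop2_eq n m t1, ← h2]
  dsimp only
  simp only [pvOdds_length, pvEvens_length]
  have hb3 : (fun (acc : List Int) (i : Int) =>
      let acc := if i < (((t2+1)/2 : Nat) : Int) then acc ++ [PySem.List.pyGetD (pvOdds t1 ((t2+1)/2)) i 0] else acc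
      let acc := if i < (((t1+1)/2 : Nat) : Int) then acc ++ [PySem.List.pyGetD (pvOdds 0 ((t1+1)/2)) i 0] else acc
      let acc := if i < ((t2/2 : Nat) : Int) then acc ++ [PySem.List.pyGetD (pvEvens t1 (t2/2)) i 0] else acc
      if i < ((t1/2 : Nat) : Int) then acc ++ [PySem.List.pyGetD (pvEvens 0 (t1/2)) i 0] else acc)
      = (fun acc i => acc ++
        ((if i < (((t2+1)/2 : Nat) : Int) then [PySem.List.pyGetD (pvOdds t1 ((t2+1)/2)) i 0] else []) ++
         ((if i < (((t1+1)/2 : Nat) : Int) then [PySem.List.pyGetD (pvOdds 0 ((t1+1)/2)) i 0] else []) ++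
          ((if i < ((t2/2 : Nat) : Int) then [PySem.List.pyGetD (pvEvens t1 (t2/2)) i 0] else []) ++
           (if i < ((t1/2 : Nat) : Int) then [PySem.List.pyGetD (pvEvens 0 (t1/2)) i 0] else []))))) := by
    funext acc i
    split_ifs <;> simp
  rw [hb3, PySem.List.foldl_append_eq_flatMap, List.nil_append]
  have hn' : n = ((n.toNat : Nat) : Int) := by omega
  rw [hn', PySem.List.pyRange_zero_natCast, List.flatMap_map]
  have hrow : (fun (j : Nat) =>
      ((if ((j : Nat) : Int) < (((t2+1)/2 : Nat) : Int) then [PySem.List.pyGetD (pvOdds t1 ((t2+1)/2)) (j : Int) 0] else []) ++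
       ((if ((j : Nat) : Int) < (((t1+1)/2 : Nat) : Int) then [PySem.List.pyGetD (pvOdds 0 ((t1+1)/2)) (j : Int) 0] else []) ++
        ((if ((j : Nat) : Int) < ((t2/2 : Nat) : Int) then [PySem.List.pyGetD (pvEvens t1 (t2/2)) (j : Int) 0] else []) ++
         (if ((j : Nat) : Int) < ((t1/2 : Nat) : Int) then [PySem.List.pyGetD (pvEvens 0 (t1/2)) (j : Int) 0] else [])))))
      = pvRow t1 ((t1+1)/2) (t1/2) ((t2+1)/2) (t2/2) := by
    funext j
    exact rowA_eq t1 ((t1+1)/2) (t1/2) ((t2+1)/2) (t2/2) j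
  rw [hrow]
  exact flatMap_range_shrink _ _ (by omega)
    (fun j hj => pvRow_nil _ _ _ _ _ (by omega) (by omega) j hj)

lemma portB_eq (n m : Int) (t1 t2 : Nat) (h1 : t1 = min (2*n.toNat) m.toNat)
    (h2 : t2 = min (2*n.toNat) (m.toNat - t1)) (hn : 0 < n) :
    get_off_order_alt n m
      = (List.range (max ((t1+1)/2) ((t2+1)/2))).flatMap (pvRow t1 ((t1+1)/2) (t1/2) ((t2+1)/2) (t2/2)) := by
  unfold get_off_order_alt
  rw [if_neg (by omega : ¬ n ≤ 0)]
  dsimp only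
  have hw : max 0 (min (2*n) m) = ((t1 : Nat) : Int) := by omega
  rw [hw]
  have hv : max 0 (min (2*n) (m - ((t1 : Nat) : Int))) = ((t2 : Nat) : Int) := by omega
  rw [hv]
  have hlw : PySem.Int.floordiv (((t1 : Nat) : Int) + 1) 2 = (((t1+1)/2 : Nat) : Int) := by
    exact_mod_cast PySem.Int.floordiv_natCast (t1+1) 2
  have hrw : PySem.Int.floordiv ((t1 : Nat) : Int) 2 = ((t1/2 : Nat) : Int) := by
    exact_mod_cast PySem.Int.floordiv_natCast t1 2
  have hlv : PySem.Int.floordiv (((t2 : Nat) : Int) + 1) 2 = (((t2+1)/2 : Nat) : Int) := by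
    exact_mod_cast PySem.Int.floordiv_natCast (t2+1) 2
  have hrv : PySem.Int.floordiv ((t2 : Nat) : Int) 2 = ((t2/2 : Nat) : Int) := by
    exact_mod_cast PySem.Int.floordiv_natCast t2 2
  rw [hlw, hrw, hlv, hrv]
  rw [show max ((((t1+1)/2 : Nat)) : Int) ((((t2+1)/2 : Nat)) : Int)
        = (((max ((t1+1)/2) ((t2+1)/2)) : Nat) : Int) from (Nat.cast_max _ _).symm]
  have hb : (fun (acc : List Int) (i : Int) =>
      let acc := if i < (((t2+1)/2 : Nat) : Int) then acc ++ [((t1 : Nat) : Int) + 2*i + 1] else acc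
      let acc := if i < (((t1+1)/2 : Nat) : Int) then acc ++ [2*i + 1] else acc
      let acc := if i < ((t2/2 : Nat) : Int) then acc ++ [((t1 : Nat) : Int) + 2*i + 2] else acc
      if i < ((t1/2 : Nat) : Int) then acc ++ [2*i + 2] else acc)
      = (fun acc i => acc ++
        ((if i < (((t2+1)/2 : Nat) : Int) then [((t1 : Nat) : Int) + 2*i + 1] else []) ++
         ((if i < (((t1+1)/2 : Nat) : Int) then [2*i + 1] else []) ++
          ((if i < ((t2/2 : Nat) : Int) then [((t1 : Nat) : Int) + 2*i + 2] else []) ++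
           (if i < ((t1/2 : Nat) : Int) then [2*i + 2] else []))))) := by
    funext acc i
    split_ifs <;> simp
  rw [hb, PySem.List.foldl_append_eq_flatMap, List.nil_append,
    PySem.List.pyRange_zero_natCast, List.flatMap_map]
  have hrow : (fun (j : Nat) =>
      ((if ((j : Nat) : Int) < (((t2+1)/2 : Nat) : Int) then [((t1 : Nat) : Int) + 2*(j : Int) + 1] else []) ++
       ((if ((j : Nat) : Int) < (((t1+1)/2 : Nat) : Int) then [2*(j : Int) + 1] else []) ++
        ((if ((j : Nat) : Int) < ((t2/2 : Nat) : Int) then [((t1 : Nat) : Int) + 2*(j : Int) + 2] else []) ++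
         (if ((j : Nat) : Int) < ((t1/2 : Nat) : Int) then [2*(j : Int) + 2] else [])))))
      = pvRow t1 ((t1+1)/2) (t1/2) ((t2+1)/2) (t2/2) := by
    funext j
    unfold pvRow
    simp only [Nat.cast_lt, List.append_assoc]
  rw [hrow]

-- ===== VERDICT (by name: the statement is the Claim_ definition above) =====
theorem get_off_order_spec : Claim_equal_get_off_order := by
  intro n m _
  unfold Spec_get_off_order
  by_cases hn : n ≤ 0
  · have h1 : PySem.List.pyRange 1 (n+1) 1 = [] := PySem.List.pyRange_one_eq_nil (by omega)
    have h2 : PySem.List.pyRange 0 n 1 = [] := PySem.List.pyRange_one_eq_nil (by omega)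
    simp [get_off_order, get_off_order_alt, h1, h2, hn]
  · rw [portA_eq n m _ _ rfl rfl (by omega), portB_eq n m _ _ rfl rfl (by omega)]
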